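-- pv_equiv track=rewrite | github.com/vanderburgt/inktvis | src/inktvis/header_stripper.py | _find_repeating_lines
-- ===== SOURCE A (Python) =====
-- def _find_repeating_lines(
--     pages: list[str], position: str, min_consecutive: int, check_lines: int = 2
-- ) -> dict[int, set[int]]:
--     """Find line indices that are repeating headers/footers.
--
--     Returns:
--         Dict mapping page index to set of line indices to remove.
--     """
--     removals: dict[int, set[int]] = {}
--
--     for line_offset in range(check_lines):
--         # Track consecutive runs
--         run_start = 0
--         run_text = None
--
--         for i in range(len(pages)):
--             lines = pages[i].split("\n")
--
--             if position == "top":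
--                 idx = line_offset
--             else:  # bottom
--                 idx = len(lines) - 1 - line_offset
--
--             if idx < 0 or idx >= len(lines):
--                 # End current run
--                 if run_text is not None and (i - run_start) >= min_consecutive:
--                     for j in range(run_start, i):
--                         page_lines = pages[j].split("\n")
--                         target_idx = line_offset if position == "top" else len(page_lines) - 1 - line_offset
--                         if target_idx >= 0 and target_idx < len(page_lines):
--                             removals.setdefault(j, set()).add(target_idx)
--                 run_text = None
--                 continue
--
--             current = lines[idx].strip()
--             if not current:
--                 # Skip blank lines, end run
--                 if run_text is not None and (i - run_start) >= min_consecutive: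
--                     for j in range(run_start, i):
--                         page_lines = pages[j].split("\n")
--                         target_idx = line_offset if position == "top" else len(page_lines) - 1 - line_offset
--                         if target_idx >= 0 and target_idx < len(page_lines):
--                             removals.setdefault(j, set()).add(target_idx)
--                 run_text = None
--                 continue
--
--             # Normalize for comparison (ignore case, extra spaces)
--             normalized = " ".join(current.lower().split())
--
--             if run_text is not None and normalized == run_text:
--                 # Continue run
--                 pass
--             elif run_text is not None and normalized != run_text:
--                 # End run, check if long enough
--                 if (i - run_start) >= min_consecutive:
--                     for j in range(run_start, i):
--                         page_lines = pages[j].split("\n")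
--                         target_idx = line_offset if position == "top" else len(page_lines) - 1 - line_offset
--                         if target_idx >= 0 and target_idx < len(page_lines):
--                             removals.setdefault(j, set()).add(target_idx)
--                 run_start = i
--                 run_text = normalized
--             else:
--                 # Start new run
--                 run_start = i
--                 run_text = normalized
--
--         # Handle final run
--         if run_text is not None and (len(pages) - run_start) >= min_consecutive:
--             for j in range(run_start, len(pages)):
--                 page_lines = pages[j].split("\n")
--                 target_idx = line_offset if position == "top" else len(page_lines) - 1 - line_offset
--                 if target_idx >= 0 and target_idx < len(page_lines):
--                     removals.setdefault(j, set()).add(target_idx)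
--
--     return removals
-- ===== SOURCE B (Python) =====
-- def _find_repeating_lines(
--     pages: list[str], position: str, min_consecutive: int, check_lines: int = 2
-- ) -> dict[int, set[int]]:
--     """Find repeating header/footer line indices.
--
--     Per-page local decision: two streak passes (prefix and suffix run lengths)
--     replace run enumeration; page i qualifies iff the maximal run through i,
--     fwd[i] + bwd[i] - 1, is at least min_consecutive.
--     """
--     removals: dict[int, set[int]] = {}
--
--     def streaks(vals):
--         out = []
--         prev = None
--         plen = 0
--         for v in vals:
--             plen = 0 if v is None else (plen + 1 if v == prev else 1)
--             out.append(plen)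
--             prev = v
--         return out
--
--     for line_offset in range(check_lines):
--         keys = []
--         for page in pages:
--             lines = page.split("\n")
--             idx = line_offset if position == "top" else len(lines) - 1 - line_offset
--             s = lines[idx].strip() if 0 <= idx < len(lines) else ""
--             keys.append((" ".join(s.lower().split()) if s else None, idx))
--         vals = [k[0] for k in keys]
--         fwd = streaks(vals)
--         bwd = streaks(vals[::-1])[::-1]
--         for i, (kv, fb) in enumerate(zip(keys, zip(fwd, bwd))):
--             if kv[0] is not None and fb[0] + fb[1] - 1 >= min_consecutive:
--                 removals.setdefault(i, set()).add(kv[1])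
--     return removals
-- ===== Notes on version B (the rewrite author's own statement) =====
-- stated objective: alternative
-- what changed: Replaces A's stateful run_start/run_text scan with its four duplicated flush blocks by two streak-length passes (prefix and suffix run lengths per page) so that each page decides locally whether it lies in a qualifying run, with no run enumeration or flushing at all.
import Mathlib
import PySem

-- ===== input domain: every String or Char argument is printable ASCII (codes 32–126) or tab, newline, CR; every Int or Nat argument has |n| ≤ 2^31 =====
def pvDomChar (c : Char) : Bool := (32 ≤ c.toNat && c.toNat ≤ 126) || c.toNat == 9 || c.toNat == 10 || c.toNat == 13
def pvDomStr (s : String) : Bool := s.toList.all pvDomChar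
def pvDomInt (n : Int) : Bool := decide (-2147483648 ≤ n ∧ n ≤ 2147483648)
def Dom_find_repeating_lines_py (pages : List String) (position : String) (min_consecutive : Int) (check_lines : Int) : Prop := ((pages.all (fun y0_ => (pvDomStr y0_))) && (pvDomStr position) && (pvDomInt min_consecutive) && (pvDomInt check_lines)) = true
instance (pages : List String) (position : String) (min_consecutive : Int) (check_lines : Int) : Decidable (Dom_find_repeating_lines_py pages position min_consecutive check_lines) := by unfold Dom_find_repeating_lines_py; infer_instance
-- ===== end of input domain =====

-- B replaces A's stateful run_start/run_text scan (with its four duplicated flush blocks) by two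
-- streak-length passes (prefix and suffix run lengths per page), so every page decides locally
-- whether it lies in a qualifying run; objective: alternative. Return values proved equal.

-- shared trivial helpers: page.split("\n") (separator is non-empty, so split? always returns some)
-- and the normalization " ".join(s.lower().split()); both appear verbatim in both Pythons.
def pvRem : Type := PySem.Dict Int (PySem.Set Int)
def pvLines (s : String) : List String := (PySem.Str.split? s "\n").getD []
def pvNorm (s : String) : String := PySem.Str.join " " (PySem.Str.split₀ (PySem.Str.lower s))

-- ===== PORT A =====
-- the flush block A repeats verbatim four times: add target_idx for every page j in [a, b)
def pvFlushA (pages : List String) (position : String) (line_offset a b : Int) (rem : pvRem) : pvRem :=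
  (PySem.List.pyRange a b 1).foldl (fun r j =>
    let page_lines := pvLines (PySem.List.pyGetD pages j "")
    let target_idx := if position == "top" then line_offset else (page_lines.length : Int) - 1 - line_offset
    if 0 ≤ target_idx ∧ target_idx < (page_lines.length : Int) then
      PySem.Dict.modify r j PySem.Set.empty (fun s => PySem.Set.add s target_idx)
    else r) rem

-- the body of A's inner 'for i in range(len(pages))' loop; state = (removals, run_start, run_text)
def pvStepA (pages : List String) (position : String) (min_consecutive line_offset : Int)
    (st : pvRem × Int × Option String) (i : Int) : pvRem × Int × Option String :=
  let lines := pvLines (PySem.List.pyGetD pages i "")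
  let idx := if position == "top" then line_offset else (lines.length : Int) - 1 - line_offset
  if idx < 0 ∨ (lines.length : Int) ≤ idx then
    ((if st.2.2 ≠ none ∧ min_consecutive ≤ i - st.2.1 then pvFlushA pages position line_offset st.2.1 i st.1 else st.1), st.2.1, none)
  else
    let current := PySem.Str.strip (PySem.List.pyGetD lines idx "")
    if current == "" then
      ((if st.2.2 ≠ none ∧ min_consecutive ≤ i - st.2.1 then pvFlushA pages position line_offset st.2.1 i st.1 else st.1), st.2.1, none)
    else
      let normalized := pvNorm current
      match st.2.2 with
      | some t =>
        if normalized == t then (st.1, st.2.1, some t)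
        else ((if min_consecutive ≤ i - st.2.1 then pvFlushA pages position line_offset st.2.1 i st.1 else st.1), i, some normalized)
      | none => (st.1, i, some normalized)

-- one iteration of A's outer 'for line_offset in range(check_lines)' loop (incl. final-run flush)
def pvInnerA (pages : List String) (position : String) (min_consecutive line_offset : Int) (rem : pvRem) : pvRem :=
  let st := (PySem.List.pyRange 0 (pages.length : Int) 1).foldl (pvStepA pages position min_consecutive line_offset) (rem, 0, none)
  if st.2.2 ≠ none ∧ min_consecutive ≤ (pages.length : Int) - st.2.1 then
    pvFlushA pages position line_offset st.2.1 (pages.length : Int) st.1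
  else st.1

def find_repeating_lines_py (pages : List String) (position : String) (min_consecutive : Int) (check_lines : Int) : List (Int × List Int) :=
  PySem.Dict.items
    ((PySem.List.pyRange 0 check_lines 1).foldl
      (fun rem line_offset => pvInnerA pages position min_consecutive line_offset rem)
      PySem.Dict.empty)

-- ===== PORT B =====
-- B's keys pass: per page the (normalized text or None, target index) pair
def pvKeysB (pages : List String) (position : String) (line_offset : Int) : List (Option String × Int) :=
  pages.map (fun page =>
    let lines := pvLines page
    let idx := if position == "top" then line_offset else (lines.length : Int) - 1 - line_offset
    let s := if 0 ≤ idx ∧ idx < (lines.length : Int) then PySem.Str.strip (PySem.List.pyGetD lines idx "") else ""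
    if s == "" then (none, idx) else (some (pvNorm s), idx))

-- Source B's streaks helper: running run length (0 at None, reset at a value change)
def pvStreaks : Option String → Int → List (Option String) → List Int
  | _, _, [] => []
  | prev, plen, v :: rest =>
    let c : Int := match v with
      | none => 0
      | some _ => if v == prev then plen + 1 else 1
    c :: pvStreaks v c rest

-- the body of Source B's final 'for i, (kv, fb) in enumerate(zip(keys, zip(fwd, bwd)))' loop
def pvStepB (min_consecutive : Int) (r : pvRem) (p : Int × ((Option String × Int) × (Int × Int))) : pvRem :=
  if p.2.1.1 ≠ none ∧ min_consecutive ≤ p.2.2.1 + p.2.2.2 - 1 then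
    PySem.Dict.modify r p.1 PySem.Set.empty (fun s => PySem.Set.add s p.2.1.2)
  else r

def pvInnerB (pages : List String) (position : String) (min_consecutive line_offset : Int) (rem : pvRem) : pvRem :=
  let keys := pvKeysB pages position line_offset
  let vals := keys.map (·.1)
  let fwd := pvStreaks none 0 vals
  -- bwd = streaks(vals[::-1])[::-1]; xs[::-1] is PySem.List.slice? xs none none (-1) (always some)
  let bwd := (PySem.List.slice? (pvStreaks none 0 ((PySem.List.slice? vals none none (-1)).getD [])) none none (-1)).getD []
  (PySem.List.enumerate (keys.zip (fwd.zip bwd))).foldl (pvStepB min_consecutive) rem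

def find_repeating_lines_py_alt (pages : List String) (position : String) (min_consecutive : Int) (check_lines : Int) : List (Int × List Int) :=
  PySem.Dict.items
    ((PySem.List.pyRange 0 check_lines 1).foldl
      (fun rem line_offset => pvInnerB pages position min_consecutive line_offset rem)
      PySem.Dict.empty)

-- ===== PRECONDITION & SPEC =====
def Spec_find_repeating_lines_py (pages : List String) (position : String) (min_consecutive : Int) (check_lines : Int) (out : List (Int × List Int)) : Prop := out = find_repeating_lines_py_alt pages position min_consecutive check_lines
instance (pages : List String) (position : String) (min_consecutive : Int) (check_lines : Int) (out : List (Int × List Int)) : Decidable (Spec_find_repeating_lines_py pages position min_consecutive check_lines out) := by unfold Spec_find_repeating_lines_py; infer_instance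

-- ===== CLAIM (what is proved, stated in full; the proofs are below) =====
def Claim_equal_find_repeating_lines_py : Prop := ∀ (pages : List String) (position : String) (min_consecutive : Int) (check_lines : Int), Dom_find_repeating_lines_py pages position min_consecutive check_lines → Spec_find_repeating_lines_py pages position min_consecutive check_lines (find_repeating_lines_py pages position min_consecutive check_lines)

-- ===== LEMMAS AND PROOFS =====

-- proof-side: run-length groups of the value sequence, and a fold over them that mirrors A's flushes
def pvRleB : List (Option String) → List (Option String × Nat)
  | [] => []
  | v :: rest =>
    match pvRleB rest with
    | [] => [(v, 1)]
    | (w, n) :: gs => if v == w then (v, n + 1) :: gs else (v, 1) :: (w, n) :: gs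

def pvAddRunB (keys : List (Option String × Int)) (a b : Int) (rem : pvRem) : pvRem :=
  (PySem.List.pyRange a b 1).foldl
    (fun r j => PySem.Dict.modify r j PySem.Set.empty (fun s => PySem.Set.add s (PySem.List.pyGetD keys j (none, 0)).2)) rem

def pvGroupsB (min_consecutive : Int) (keys : List (Option String × Int))
    (groups : List (Option String × Nat)) (st : pvRem × Int) : pvRem × Int :=
  groups.foldl (fun st g =>
    ((match g.1 with
      | some _ => if min_consecutive ≤ (g.2 : Int) then pvAddRunB keys st.2 (st.2 + (g.2 : Int)) st.1 else st.1
      | none => st.1), st.2 + (g.2 : Int))) st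

-- the value A's scan reacts to at page index j (= keys[j].1): none = out-of-range or blank line
def pvValAt (pages : List String) (position : String) (line_offset : Int) (j : Int) : Option String :=
  (PySem.List.pyGetD (pvKeysB pages position line_offset) j (none, 0)).1

-- proof-side twin of pvStepA that reads the precomputed value and adds via keys
def pvStepK (pages : List String) (position : String) (min_consecutive line_offset : Int)
    (st : pvRem × Int × Option String) (i : Int) (v : Option String) : pvRem × Int × Option String :=
  match v with
  | none =>
    ((if st.2.2 ≠ none ∧ min_consecutive ≤ i - st.2.1 then pvAddRunB (pvKeysB pages position line_offset) st.2.1 i st.1 else st.1), st.2.1, none)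
  | some nv =>
    match st.2.2 with
    | some t =>
      if nv == t then (st.1, st.2.1, some t)
      else ((if min_consecutive ≤ i - st.2.1 then pvAddRunB (pvKeysB pages position line_offset) st.2.1 i st.1 else st.1), i, some nv)
    | none => (st.1, i, some nv)

def pvScanK (pages : List String) (position : String) (min_consecutive line_offset : Int) :
    List (Option String) → Int → pvRem × Int × Option String → pvRem
  | [], i, st =>
    if st.2.2 ≠ none ∧ min_consecutive ≤ i - st.2.1 then pvAddRunB (pvKeysB pages position line_offset) st.2.1 i st.1 else st.1
  | v :: rest, i, st => pvScanK pages position min_consecutive line_offset rest (i + 1) (pvStepK pages position min_consecutive line_offset st i v)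

-- invariant of A's scan state at index i
def pvInv (pages : List String) (position : String) (line_offset : Int) (st : pvRem × Int × Option String) (i : Int) : Prop :=
  0 ≤ st.2.1 ∧ st.2.1 ≤ i ∧
    (st.2.2 ≠ none → ∀ j : Int, st.2.1 ≤ j → j < i → pvValAt pages position line_offset j = st.2.2)

lemma pvKeys_get (pages : List String) (position : String) (line_offset : Int) (j : Int)
    (h0 : 0 ≤ j) (h1 : j < (pages.length : Int)) :
    PySem.List.pyGetD (pvKeysB pages position line_offset) j (none, 0) =
      (let lines := pvLines (PySem.List.pyGetD pages j "");
       let idx := if position == "top" then line_offset else (lines.length : Int) - 1 - line_offset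
       let s := if 0 ≤ idx ∧ idx < (lines.length : Int) then PySem.Str.strip (PySem.List.pyGetD lines idx "") else ""
       if s == "" then ((none : Option String), idx) else (some (pvNorm s), idx)) := by
  have hlen : j < (((pvKeysB pages position line_offset).length : Nat) : Int) := by
    simpa [pvKeysB] using h1
  rw [PySem.List.pyGetD_eq_getElem _ (none, 0) h0 hlen,
      PySem.List.pyGetD_eq_getElem pages "" h0 h1]
  simp [pvKeysB]

lemma pvFlush_eq_add (pages : List String) (position : String) (line_offset a b : Int) (rem : pvRem)
    (ha : 0 ≤ a) (hb : b ≤ (pages.length : Int))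
    (hall : ∀ j : Int, a ≤ j → j < b → pvValAt pages position line_offset j ≠ none) :
    pvFlushA pages position line_offset a b rem = pvAddRunB (pvKeysB pages position line_offset) a b rem := by
  unfold pvFlushA pvAddRunB
  refine PySem.List.foldl_congr_mem _ _ _ _ ?_
  intro acc j hj
  obtain ⟨hja, hjb⟩ := PySem.List.mem_pyRange_one.mp hj
  have h0j : 0 ≤ j := le_trans ha hja
  have hjn : j < (pages.length : Int) := lt_of_lt_of_le hjb hb
  have hk := pvKeys_get pages position line_offset j h0j hjn
  have hne := hall j hja hjb
  dsimp only
  rw [hk]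
  unfold pvValAt at hne
  rw [hk] at hne
  dsimp only at hne ⊢
  set L := pvLines (PySem.List.pyGetD pages j "") with hL
  set idx := (if position == "top" then line_offset else (L.length : Int) - 1 - line_offset) with hidx
  by_cases hg : 0 ≤ idx ∧ idx < (L.length : Int)
  · by_cases hs : PySem.Str.strip (PySem.List.pyGetD L idx "") == ""
    · exfalso; apply hne; simp [hg, hs]
    · simp [hg, hs]
  · exfalso; apply hne; simp [hg]

lemma pvStepA_eq (pages : List String) (position : String) (min_consecutive line_offset : Int)
    (st : pvRem × Int × Option String) (i : Int) (h0 : 0 ≤ i) (h1 : i < (pages.length : Int))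
    (hInv : pvInv pages position line_offset st i) :
    pvStepA pages position min_consecutive line_offset st i =
      pvStepK pages position min_consecutive line_offset st i (pvValAt pages position line_offset i) := by
  obtain ⟨rem, rs, rt⟩ := st
  obtain ⟨h0rs, hrsi, hrun⟩ := hInv
  have hadd : rt ≠ none → pvFlushA pages position line_offset rs i rem =
      pvAddRunB (pvKeysB pages position line_offset) rs i rem := by
    intro hrt
    exact pvFlush_eq_add pages position line_offset rs i rem h0rs (le_of_lt h1)
      (fun j hj1 hj2 => by rw [hrun hrt j hj1 hj2]; exact hrt)
  have hk := pvKeys_get pages position line_offset i h0 h1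
  unfold pvStepA pvStepK pvValAt
  rw [hk]
  dsimp only
  set L := pvLines (PySem.List.pyGetD pages i "") with hL
  set idx := (if position == "top" then line_offset else (L.length : Int) - 1 - line_offset) with hidx
  by_cases hg : idx < 0 ∨ (L.length : Int) ≤ idx
  · have hg' : ¬ (0 ≤ idx ∧ idx < (L.length : Int)) := by omega
    rw [if_pos hg, if_neg hg']
    have he : ((("" : String) == "") = true) := rfl
    rw [if_pos he]
    dsimp only
    split_ifs with hc
    · rw [hadd hc.1]
    · rfl
  · have hg' : 0 ≤ idx ∧ idx < (L.length : Int) := by omega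
    rw [if_neg hg, if_pos hg']
    by_cases hs : (PySem.Str.strip (PySem.List.pyGetD L idx "") == "") = true
    · rw [if_pos hs, if_pos hs]
      dsimp only
      split_ifs with hc
      · rw [hadd hc.1]
      · rfl
    · rw [if_neg hs, if_neg hs]
      dsimp only
      cases rt with
      | none => rfl
      | some t =>
        dsimp only
        by_cases hb : (pvNorm (PySem.Str.strip (PySem.List.pyGetD L idx "")) == t) = true
        · rw [if_pos hb, if_pos hb]
        · rw [if_neg hb, if_neg hb]
          split_ifs with hc
          · rw [hadd (by simp)]
          · rfl

lemma pvInv_step (pages : List String) (position : String) (min_consecutive line_offset : Int)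
    (st : pvRem × Int × Option String) (i : Int) (h0 : 0 ≤ i)
    (hInv : pvInv pages position line_offset st i) :
    pvInv pages position line_offset
      (pvStepK pages position min_consecutive line_offset st i (pvValAt pages position line_offset i)) (i + 1) := by
  obtain ⟨rem, rs, rt⟩ := st
  obtain ⟨h0rs, hrsi, hrun⟩ := hInv
  simp only at h0rs hrsi hrun
  cases hv : pvValAt pages position line_offset i with
  | none =>
    refine ⟨?_, ?_, ?_⟩
    · show (0 : Int) ≤ rs; exact h0rs
    · show rs ≤ i + 1; omega
    · show (none : Option String) ≠ none → _
      intro h; exact absurd rfl h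
  | some nv =>
    cases rt with
    | none =>
      refine ⟨?_, ?_, ?_⟩
      · show (0 : Int) ≤ i; exact h0
      · show i ≤ i + 1; omega
      · show some nv ≠ none → ∀ j : Int, i ≤ j → j < i + 1 → pvValAt pages position line_offset j = some nv
        intro _ j hj1 hj2
        have hj : j = i := by omega
        rw [hj, hv]
    | some t =>
      cases hbool : nv == t with
      | true =>
        have ht : nv = t := eq_of_beq hbool
        have hred : pvStepK pages position min_consecutive line_offset (rem, rs, some t) i (some nv) =
            (rem, rs, some t) := by
          simp [pvStepK, hbool]
        rw [hred]
        refine ⟨h0rs, by show rs ≤ i + 1; omega, ?_⟩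
        show some t ≠ none → ∀ j : Int, rs ≤ j → j < i + 1 → pvValAt pages position line_offset j = some t
        intro hne j hj1 hj2
        by_cases hji : j < i
        · exact hrun (by simp) j hj1 hji
        · have hj : j = i := by omega
          rw [hj, hv, ht]
      | false =>
        have hred : pvStepK pages position min_consecutive line_offset (rem, rs, some t) i (some nv) =
            ((if min_consecutive ≤ i - rs then pvAddRunB (pvKeysB pages position line_offset) rs i rem else rem), i, some nv) := by
          simp only [pvStepK, hbool]
          simp
        rw [hred]
        refine ⟨h0, by show i ≤ i + 1; omega, ?_⟩
        show some nv ≠ none → ∀ j : Int, i ≤ j → j < i + 1 → pvValAt pages position line_offset j = some nv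
        intro _ j hj1 hj2
        have hj : j = i := by omega
        rw [hj, hv]

-- A's indexed fold + final flush = the value-driven scan over the suffix of precomputed values
lemma pvA_to_scan (pages : List String) (position : String) (min_consecutive line_offset : Int) :
    ∀ (k : Nat) (i : Int) (st : pvRem × Int × Option String), i = (pages.length : Int) - k → 0 ≤ i →
      pvInv pages position line_offset st i →
      (let st' := (PySem.List.pyRange i (pages.length : Int) 1).foldl (pvStepA pages position min_consecutive line_offset) st;
       if st'.2.2 ≠ none ∧ min_consecutive ≤ (pages.length : Int) - st'.2.1 then
         pvFlushA pages position line_offset st'.2.1 (pages.length : Int) st'.1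
       else st'.1) =
      pvScanK pages position min_consecutive line_offset
        (((pvKeysB pages position line_offset).map (·.1)).drop i.toNat) i st := by
  intro k
  induction k with
  | zero =>
    intro i st hi h0i hInv
    have hin : i = (pages.length : Int) := by push_cast at hi; omega
    subst hin
    obtain ⟨rem, rs, rt⟩ := st
    obtain ⟨h0rs, hrsi, hrun⟩ := hInv
    have hdrop : ((pvKeysB pages position line_offset).map (·.1)).drop (pages.length : Int).toNat = [] := by
      apply List.drop_eq_nil_of_le
      simp [pvKeysB]
    rw [PySem.List.pyRange_one_eq_nil (le_refl _), hdrop]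
    simp only [List.foldl_nil, pvScanK]
    split_ifs with hc
    · exact pvFlush_eq_add pages position line_offset rs (pages.length : Int) rem h0rs (le_refl _)
        (fun j hj1 hj2 => by rw [hrun hc.1 j hj1 hj2]; exact hc.1)
    · rfl
  | succ k ih =>
    intro i st hi h0i hInv
    have hlt : i < (pages.length : Int) := by push_cast at hi; omega
    have hlen : i.toNat < ((pvKeysB pages position line_offset).map (·.1)).length := by
      simp only [List.length_map, pvKeysB]
      omega
    have hd : ((pvKeysB pages position line_offset).map (·.1)).drop i.toNat =
        pvValAt pages position line_offset i ::
          ((pvKeysB pages position line_offset).map (·.1)).drop (i.toNat + 1) := by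
      rw [List.drop_eq_getElem_cons hlen]
      congr 1
      unfold pvValAt
      rw [PySem.List.pyGetD_eq_getElem _ (none, 0) h0i (by simpa [pvKeysB] using hlt)]
      exact List.getElem_map _
    have hst := pvStepA_eq pages position min_consecutive line_offset st i h0i hlt hInv
    have hInv' : pvInv pages position line_offset
        (pvStepA pages position min_consecutive line_offset st i) (i + 1) := by
      rw [hst]
      exact pvInv_step pages position min_consecutive line_offset st i h0i hInv
    have hrec := ih (i + 1) (pvStepA pages position min_consecutive line_offset st i)
      (by push_cast at hi ⊢; omega) (by omega) hInv'
    rw [PySem.List.pyRange_one_cons hlt]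
    simp only [List.foldl_cons]
    rw [hd]
    simp only [pvScanK]
    rw [← hst]
    have htn : (i + 1).toNat = i.toNat + 1 := by omega
    rw [← htn]
    exact hrec

-- run-length encoding with a pending run of p ≥ 1 copies prepended
lemma pvRle_replicate (v : Option String) (p : Nat) (hp : 1 ≤ p) (l : List (Option String)) :
    pvRleB (List.replicate p v ++ l) =
      (match pvRleB l with
       | [] => [(v, p)]
       | (w, n) :: gs => if v == w then (v, p + n) :: gs else (v, p) :: (w, n) :: gs) := by
  induction p with
  | zero => omega
  | succ q ihq =>
    cases Nat.eq_zero_or_pos q with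
    | inl hq =>
      subst hq
      rw [show (0 : Nat) + 1 = 1 from rfl]
      simp only [List.replicate_one, List.singleton_append]
      cases h : pvRleB l with
      | nil => simp [pvRleB, h]
      | cons g gs =>
        obtain ⟨w, n⟩ := g
        cases hvw : v == w with
        | true =>
          have hvv : v = w := eq_of_beq hvw
          subst hvv
          simp [pvRleB, h]
          omega
        | false => simp [pvRleB, h, hvw]
    | inr hq =>
      have ih := ihq hq
      rw [show List.replicate (q + 1) v ++ l = v :: (List.replicate q v ++ l) from by
        simp [List.replicate_succ]]
      simp only [pvRleB]
      rw [ih]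
      cases h : pvRleB l with
      | nil => simp
      | cons g gs =>
        obtain ⟨w, n⟩ := g
        cases hvw : v == w with
        | true =>
          have hvv : v = w := eq_of_beq hvw
          subst hvv
          simp
          omega
        | false => simp [hvw]

lemma pvRle_cons_head (v : Option String) (l : List (Option String)) :
    ∃ k gs, pvRleB (v :: l) = (v, k) :: gs := by
  cases h : pvRleB l with
  | nil => exact ⟨1, [], by simp [pvRleB, h]⟩
  | cons g gs =>
    obtain ⟨w, n⟩ := g
    by_cases hvw : v == w
    · have : v = w := eq_of_beq hvw
      subst this
      exact ⟨n + 1, gs, by simp [pvRleB, h]⟩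
    · exact ⟨1, (w, n) :: gs, by simp [pvRleB, h, hvw]⟩

lemma pvGroups_cons (min_consecutive : Int) (keys : List (Option String × Int))
    (g : Option String × Nat) (groups : List (Option String × Nat)) (st : pvRem × Int) :
    pvGroupsB min_consecutive keys (g :: groups) st =
      pvGroupsB min_consecutive keys groups
        ((match g.1 with
          | some _ => if min_consecutive ≤ (g.2 : Int) then pvAddRunB keys st.2 (st.2 + (g.2 : Int)) st.1 else st.1
          | none => st.1), st.2 + (g.2 : Int)) := rfl

lemma pvGroups_none_shift (min_consecutive : Int) (keys : List (Option String × Int))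
    (l : List (Option String)) (st : pvRem × Int) :
    pvGroupsB min_consecutive keys (pvRleB ((none : Option String) :: l)) st =
      pvGroupsB min_consecutive keys (pvRleB l) (st.1, st.2 + 1) := by
  obtain ⟨rem, s⟩ := st
  cases h : pvRleB l with
  | nil => simp [pvRleB, h, pvGroupsB]
  | cons g gs =>
    obtain ⟨w, n⟩ := g
    cases w with
    | none =>
      have h2 : pvRleB ((none : Option String) :: l) = ((none : Option String), n + 1) :: gs := by
        simp [pvRleB, h]
      rw [h2, pvGroups_cons, pvGroups_cons]
      dsimp only
      rw [show s + ((n + 1 : Nat) : Int) = (s + 1) + ((n : Nat) : Int) from by push_cast; ring]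
    | some t =>
      have h2 : pvRleB ((none : Option String) :: l) =
          ((none : Option String), 1) :: ((some t : Option String), n) :: gs := by
        simp [pvRleB, h]
      rw [h2, pvGroups_cons]
      dsimp only
      rw [show s + ((1 : Nat) : Int) = s + 1 from by push_cast; ring]

-- core combinatorial lemma: the value-driven scan equals the grouping pass over the rle
lemma pvScan_eq_groups (pages : List String) (position : String) (min_consecutive line_offset : Int) :
    ∀ (suffix : List (Option String)) (s : Int) (rem : pvRem),
      (∀ rs : Int, pvScanK pages position min_consecutive line_offset suffix s (rem, rs, none) =
        (pvGroupsB min_consecutive (pvKeysB pages position line_offset) (pvRleB suffix) (rem, s)).1)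
      ∧ (∀ (t : String) (p : Nat), 1 ≤ p →
        pvScanK pages position min_consecutive line_offset suffix s (rem, s - (p : Int), some t) =
          (pvGroupsB min_consecutive (pvKeysB pages position line_offset)
            (pvRleB (List.replicate p (some t) ++ suffix)) (rem, s - (p : Int))).1) := by
  intro suffix
  induction suffix with
  | nil =>
    intro s rem
    constructor
    · intro rs
      simp [pvScanK, pvRleB, pvGroupsB]
    · intro t p hp
      have h1 : s - (s - (p : Int)) = (p : Int) := by ring
      have h2 : (s - (p : Int)) + (p : Int) = s := by ring
      rw [pvRle_replicate (some t) p hp []]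
      simp only [pvRleB]
      simp [pvScanK, pvGroupsB, h1, h2]
  | cons v rest ih =>
    intro s rem
    constructor
    · intro rs
      cases v with
      | none =>
        simp only [pvScanK, pvStepK]
        try simp only [ne_eq, not_true_eq_false, false_and, if_false]
        rw [(ih (s + 1) rem).1 rs]
        rw [pvGroups_none_shift]
      | some nv =>
        simp only [pvScanK, pvStepK]
        have hIH := (ih (s + 1) rem).2 nv 1 (le_refl 1)
        simp only [Nat.cast_one] at hIH
        rw [show s + 1 - (1 : Int) = s from by ring] at hIH
        rw [List.replicate_one, List.singleton_append] at hIH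
        exact hIH
    · intro t p hp
      cases v with
      | none =>
        have hstep : pvStepK pages position min_consecutive line_offset
            (rem, s - (p : Int), some t) s none =
            ((if min_consecutive ≤ (p : Int) then
                pvAddRunB (pvKeysB pages position line_offset) (s - (p : Int)) s rem else rem),
              s - (p : Int), none) := by
          simp only [pvStepK]
          rw [show s - (s - (p : Int)) = (p : Int) from by ring]
          simp
        simp only [pvScanK]
        rw [hstep]
        set rem' := (if min_consecutive ≤ (p : Int) then
            pvAddRunB (pvKeysB pages position line_offset) (s - (p : Int)) s rem else rem) with hrem'
        rw [(ih (s + 1) rem').1 (s - (p : Int))]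
        obtain ⟨k, gs, hk⟩ := pvRle_cons_head (none : Option String) rest
        rw [pvRle_replicate (some t) p hp ((none : Option String) :: rest), hk]
        have hbt : ((some t : Option String) == (none : Option String)) = false := rfl
        dsimp only
        rw [hbt]
        simp only [Bool.false_eq_true, if_false]
        rw [← hk, pvGroups_cons]
        dsimp only
        rw [show (s - (p : Int)) + ((p : Nat) : Int) = s from by ring]
        rw [pvGroups_none_shift]
      | some nv =>
        cases hbool : nv == t with
        | true =>
          have ht : nv = t := eq_of_beq hbool
          subst ht
          have hstep : pvStepK pages position min_consecutive line_offset
              (rem, s - (p : Int), some nv) s (some nv) = (rem, s - (p : Int), some nv) := by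
            simp [pvStepK]
          simp only [pvScanK]
          rw [hstep]
          have hIH := (ih (s + 1) rem).2 nv (p + 1) (by omega)
          rw [show s + 1 - ((p + 1 : Nat) : Int) = s - (p : Int) from by push_cast; ring] at hIH
          rw [show List.replicate (p + 1) (some nv) ++ rest =
              List.replicate p (some nv) ++ (some nv :: rest) from by
            rw [List.replicate_succ']; simp] at hIH
          exact hIH
        | false =>
          have hnt : t ≠ nv := fun h => by simp [h] at hbool
          have hstep : pvStepK pages position min_consecutive line_offset
              (rem, s - (p : Int), some t) s (some nv) =
              ((if min_consecutive ≤ (p : Int) then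
                  pvAddRunB (pvKeysB pages position line_offset) (s - (p : Int)) s rem else rem),
                s, some nv) := by
            simp only [pvStepK, hbool]
            rw [show s - (s - (p : Int)) = (p : Int) from by ring]
            simp
          simp only [pvScanK]
          rw [hstep]
          set rem' := (if min_consecutive ≤ (p : Int) then
              pvAddRunB (pvKeysB pages position line_offset) (s - (p : Int)) s rem else rem) with hrem'
          have hIH := (ih (s + 1) rem').2 nv 1 (le_refl 1)
          simp only [Nat.cast_one] at hIH
          rw [show s + 1 - (1 : Int) = s from by ring] at hIH
          rw [List.replicate_one, List.singleton_append] at hIH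
          rw [hIH]
          obtain ⟨k, gs, hk⟩ := pvRle_cons_head (some nv) rest
          rw [pvRle_replicate (some t) p hp (some nv :: rest), hk]
          have hbt : ((some t : Option String) == some nv) = false := by
            simp [hnt]
          dsimp only
          rw [hbt]
          simp only [Bool.false_eq_true, if_false]
          conv_rhs => rw [pvGroups_cons]
          dsimp only
          rw [show (s - (p : Int)) + ((p : Nat) : Int) = s from by ring]


-- proof-side: run-length structure of the value sequence and streak blocks
def pvExpand (gs : List (Option String × Nat)) : List (Option String) :=
  gs.flatMap (fun g => List.replicate g.2 g.1)

def pvRamp (n : Nat) : List Int := (List.range n).map (fun k : Nat => (k : Int) + 1)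

def pvFwdBlock (g : Option String × Nat) : List Int :=
  match g.1 with | none => List.replicate g.2 0 | some _ => pvRamp g.2

def pvBwdBlock (g : Option String × Nat) : List Int :=
  match g.1 with | none => List.replicate g.2 0 | some _ => (pvRamp g.2).reverse

def pvGood (gs : List (Option String × Nat)) : Prop :=
  (∀ g ∈ gs, 1 ≤ g.2) ∧ List.IsChain (fun a b => a.1 ≠ b.1) gs

def pvStepOp (r : pvRem) (q : Int × (Option String × Int)) : pvRem :=
  PySem.Dict.modify r q.1 PySem.Set.empty (fun s => PySem.Set.add s q.2.2)

lemma pvExpand_rle : ∀ l : List (Option String), pvExpand (pvRleB l) = l := by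
  intro l
  induction l with
  | nil => rfl
  | cons v rest ih =>
    cases h : pvRleB rest with
    | nil =>
      have hrest : rest = [] := by rw [← ih, h]; rfl
      subst hrest
      rfl
    | cons g gs =>
      obtain ⟨w, n⟩ := g
      cases hvw : v == w with
      | true =>
        have hv : v = w := eq_of_beq hvw
        subst hv
        have hred : pvRleB (v :: rest) = (v, n + 1) :: gs := by simp [pvRleB, h]
        rw [hred, ← ih, h]
        simp [pvExpand, List.replicate_succ]
      | false =>
        have hred : pvRleB (v :: rest) = (v, 1) :: (w, n) :: gs := by simp [pvRleB, h, hvw]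
        rw [hred, ← ih, h]
        simp [pvExpand]

lemma pvRle_pos : ∀ (l : List (Option String)) (g : Option String × Nat), g ∈ pvRleB l → 1 ≤ g.2 := by
  intro l
  induction l with
  | nil => intro g hg; simp [pvRleB] at hg
  | cons v rest ih =>
    intro g hg
    cases h : pvRleB rest with
    | nil =>
      have hred : pvRleB (v :: rest) = [(v, 1)] := by simp [pvRleB, h]
      rw [hred] at hg
      simp at hg
      subst hg; simp
    | cons g0 gs =>
      obtain ⟨w, n⟩ := g0
      cases hvw : v == w with
      | true =>
        have hv : v = w := eq_of_beq hvw
        subst hv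
        have hred : pvRleB (v :: rest) = (v, n + 1) :: gs := by simp [pvRleB, h]
        rw [hred] at hg
        rcases List.mem_cons.mp hg with hg | hg
        · subst hg; simp
        · exact ih g (by rw [h]; exact List.mem_cons_of_mem _ hg)
      | false =>
        have hred : pvRleB (v :: rest) = (v, 1) :: (w, n) :: gs := by simp [pvRleB, h, hvw]
        rw [hred] at hg
        rcases List.mem_cons.mp hg with hg | hg
        · subst hg; simp
        · exact ih g (by rw [h]; exact hg)

lemma pvRle_chain : ∀ l : List (Option String), List.IsChain (fun a b => a.1 ≠ b.1) (pvRleB l) := by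
  intro l
  induction l with
  | nil => simp [pvRleB]
  | cons v rest ih =>
    cases h : pvRleB rest with
    | nil =>
      have hred : pvRleB (v :: rest) = [(v, 1)] := by simp [pvRleB, h]
      rw [hred]
      simp
    | cons g0 gs =>
      obtain ⟨w, n⟩ := g0
      rw [h] at ih
      cases hvw : v == w with
      | true =>
        have hv : v = w := eq_of_beq hvw
        subst hv
        have hred : pvRleB (v :: rest) = (v, n + 1) :: gs := by simp [pvRleB, h]
        rw [hred]
        rw [List.isChain_cons] at ih ⊢
        exact ⟨ih.1, ih.2⟩
      | false =>
        have hred : pvRleB (v :: rest) = (v, 1) :: (w, n) :: gs := by simp [pvRleB, h, hvw]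
        rw [hred]
        rw [List.isChain_cons]
        refine ⟨?_, ih⟩
        intro y hy
        simp at hy
        subst hy
        simpa using (by simpa using hvw : (v == w) = false)

lemma pvStreaks_none_aux : ∀ (m : Nat) (rest : List (Option String)),
    pvStreaks none 0 (List.replicate m none ++ rest) = List.replicate m 0 ++ pvStreaks none 0 rest := by
  intro m
  induction m with
  | zero => intro rest; simp
  | succ q ih =>
    intro rest
    have hstep : pvStreaks none 0 (List.replicate (q + 1) none ++ rest) =
        0 :: pvStreaks none 0 (List.replicate q none ++ rest) := by
      simp [List.replicate_succ, pvStreaks]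
    rw [hstep, ih]
    simp [List.replicate_succ]

lemma pvStreaks_none_block (prev : Option String) (plen : Int) (n : Nat) (hn : 1 ≤ n)
    (rest : List (Option String)) :
    pvStreaks prev plen (List.replicate n none ++ rest) = List.replicate n 0 ++ pvStreaks none 0 rest := by
  obtain ⟨m, rfl⟩ : ∃ m, n = m + 1 := ⟨n - 1, by omega⟩
  have hstep : pvStreaks prev plen (List.replicate (m + 1) none ++ rest) =
      0 :: pvStreaks none 0 (List.replicate m none ++ rest) := by
    simp [List.replicate_succ, pvStreaks]
  rw [hstep, pvStreaks_none_aux]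
  simp [List.replicate_succ]

lemma pvStreaks_some_aux : ∀ (m : Nat) (t : String) (p : Int) (rest : List (Option String)),
    pvStreaks (some t) p (List.replicate m (some t) ++ rest) =
      (List.range m).map (fun k : Nat => p + (k : Int) + 1) ++ pvStreaks (some t) (p + (m : Int)) rest := by
  intro m
  induction m with
  | zero => intro t p rest; simp
  | succ q ih =>
    intro t p rest
    have hstep : pvStreaks (some t) p (List.replicate (q + 1) (some t) ++ rest) =
        (p + 1) :: pvStreaks (some t) (p + 1) (List.replicate q (some t) ++ rest) := by
      simp [List.replicate_succ, pvStreaks]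
    have hmap : (List.range (q + 1)).map (fun k : Nat => p + (k : Int) + 1) =
        (p + 1) :: (List.range q).map (fun k : Nat => (p + 1) + (k : Int) + 1) := by
      rw [List.range_succ_eq_map, List.map_cons, List.map_map]
      congr 1
      · push_cast; ring
      · apply List.map_congr_left
        intro k _
        simp only [Function.comp_apply]
        push_cast; ring
    rw [hstep, ih t (p + 1) rest, hmap,
        show p + ((q + 1 : Nat) : Int) = p + 1 + ((q : Nat) : Int) from by push_cast; ring]
    simp only [List.cons_append]

lemma pvStreaks_some_block (prev : Option String) (plen : Int) (t : String) (n : Nat) (hn : 1 ≤ n)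
    (hne : ((some t : Option String) == prev) = false) (rest : List (Option String)) :
    pvStreaks prev plen (List.replicate n (some t) ++ rest) =
      pvRamp n ++ pvStreaks (some t) (n : Int) rest := by
  obtain ⟨m, rfl⟩ : ∃ m, n = m + 1 := ⟨n - 1, by omega⟩
  have hstep : pvStreaks prev plen (List.replicate (m + 1) (some t) ++ rest) =
      1 :: pvStreaks (some t) 1 (List.replicate m (some t) ++ rest) := by
    simp [List.replicate_succ, pvStreaks, hne]
  have hmap : pvRamp (m + 1) = 1 :: (List.range m).map (fun k : Nat => (1 : Int) + (k : Int) + 1) := by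
    apply List.ext_getElem
    · simp [pvRamp]
    · intro i h1 h2
      cases i with
      | zero => simp [pvRamp]
      | succ j =>
        simp only [pvRamp, List.getElem_cons_succ, List.getElem_map, List.getElem_range]
        omega
  rw [hstep, pvStreaks_some_aux m t 1 rest, hmap,
      show ((m + 1 : Nat) : Int) = 1 + ((m : Nat) : Int) from by push_cast; ring]
  simp only [List.cons_append]

def pvPrevOK (prev : Option String) : List (Option String × Nat) → Prop
  | [] => True
  | g :: _ => g.1 = none ∨ g.1 ≠ prev

lemma pvPrevOK_none : ∀ gs : List (Option String × Nat), pvPrevOK none gs := by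
  intro gs
  cases gs with
  | nil => trivial
  | cons g _ =>
    by_cases h : g.1 = none
    · exact Or.inl h
    · exact Or.inr h

lemma pvFwd_expand : ∀ (gs : List (Option String × Nat)) (prev : Option String) (plen : Int),
    pvGood gs → pvPrevOK prev gs →
    pvStreaks prev plen (pvExpand gs) = gs.flatMap pvFwdBlock := by
  intro gs
  induction gs with
  | nil => intro prev plen _ _; rfl
  | cons g gs' ih =>
    intro prev plen hgood hok
    obtain ⟨v, n⟩ := g
    have hn : 1 ≤ n := hgood.1 _ (List.mem_cons_self ..)
    have hpos' : ∀ g ∈ gs', 1 ≤ g.2 := fun g hg => hgood.1 g (List.mem_cons_of_mem _ hg)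
    have hchain' : List.IsChain (fun a b => a.1 ≠ b.1) gs' := (List.isChain_cons.mp hgood.2).2
    have hhead : ∀ h ∈ gs'.head?, (v, n).1 ≠ h.1 := (List.isChain_cons.mp hgood.2).1
    have hexp : pvExpand ((v, n) :: gs') = List.replicate n v ++ pvExpand gs' := by
      simp [pvExpand]
    rw [hexp]
    cases v with
    | none =>
      rw [pvStreaks_none_block prev plen n hn]
      rw [ih none 0 ⟨hpos', hchain'⟩ (pvPrevOK_none gs')]
      simp [pvFwdBlock]
    | some t =>
      have hne : ((some t : Option String) == prev) = false := by
        rcases hok with h | h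
        · exact absurd h (by simp)
        · simpa using h
      rw [pvStreaks_some_block prev plen t n hn hne]
      have hok' : pvPrevOK (some t) gs' := by
        cases gs' with
        | nil => trivial
        | cons h' rest' =>
          refine Or.inr ?_
          have := hhead h' (by simp)
          exact fun he => this (by rw [he])
      rw [ih (some t) (n : Int) ⟨hpos', hchain'⟩ hok']
      simp [pvFwdBlock, pvRamp]

lemma pvFwdBlock_reverse (g : Option String × Nat) : (pvFwdBlock g).reverse = pvBwdBlock g := by
  obtain ⟨v, n⟩ := g
  cases v with
  | none => simp [pvFwdBlock, pvBwdBlock]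
  | some t => rfl

lemma pvExpand_reverse : ∀ gs : List (Option String × Nat),
    (pvExpand gs).reverse = pvExpand gs.reverse := by
  intro gs
  induction gs with
  | nil => rfl
  | cons g gs' ih =>
    have h1 : pvExpand (g :: gs') = List.replicate g.2 g.1 ++ pvExpand gs' := by
      simp [pvExpand]
    have h2 : pvExpand ((g :: gs').reverse) = pvExpand gs'.reverse ++ List.replicate g.2 g.1 := by
      simp [pvExpand, List.reverse_cons]
    rw [h1, List.reverse_append, List.reverse_replicate, ih, h2]

lemma pvGood_reverse {gs : List (Option String × Nat)} (h : pvGood gs) : pvGood gs.reverse := by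
  refine ⟨fun g hg => h.1 g (List.mem_reverse.mp hg), ?_⟩
  rw [List.isChain_reverse]
  exact h.2.imp (fun _ _ hab => Ne.symm hab)

lemma pvFlatMap_rev_reverse : ∀ gs : List (Option String × Nat),
    (gs.reverse.flatMap pvFwdBlock).reverse = gs.flatMap pvBwdBlock := by
  intro gs
  induction gs with
  | nil => rfl
  | cons g gs' ih =>
    simp only [List.reverse_cons, List.flatMap_append, List.flatMap_cons, List.flatMap_nil,
      List.append_nil, List.reverse_append, pvFwdBlock_reverse]
    rw [ih]

lemma pvBwd_expand (gs : List (Option String × Nat)) (hgood : pvGood gs) :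
    (pvStreaks none 0 (pvExpand gs).reverse).reverse = gs.flatMap pvBwdBlock := by
  rw [pvExpand_reverse]
  rw [pvFwd_expand gs.reverse none 0 (pvGood_reverse hgood) (pvPrevOK_none _)]
  exact pvFlatMap_rev_reverse gs

lemma pvZip_ramp_sum (n : Nat) :
    ∀ p ∈ List.zip (pvRamp n) ((pvRamp n).reverse), p.1 + p.2 - 1 = (n : Int) := by
  intro p hp
  have hlen : (pvRamp n).length = n := by simp [pvRamp]
  rw [List.mem_iff_getElem] at hp
  obtain ⟨i, hi, hpi⟩ := hp
  have hin : i < n := by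
    have := hi
    simp only [List.length_zip, List.length_reverse, hlen, min_self] at this
    exact this
  rw [List.getElem_zip] at hpi
  have hi1 : i < (pvRamp n).length := by rw [hlen]; exact hin
  have hi2 : i < ((pvRamp n).reverse).length := by simpa [hlen] using hin
  have h1 : (pvRamp n)[i]'hi1 = (i : Int) + 1 := by simp [pvRamp]
  have h2 : ((pvRamp n).reverse)[i]'hi2 = ((n - 1 - i : Nat) : Int) + 1 := by
    rw [List.getElem_reverse]
    simp [pvRamp]
  subst hpi
  simp only [h1, h2]
  omega

-- fold helpers: a block whose guard is everywhere false contributes nothing;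
-- a block whose guard is everywhere true reduces to the plain add fold
lemma pvFold_skip_none (m : Int) : ∀ (seg : List (Option String × Int)) (fbs : List (Int × Int)) (s : Int) (rem : pvRem),
    (∀ kv ∈ seg, kv.1 = (none : Option String)) →
    (PySem.List.enumerate (seg.zip fbs) s).foldl (pvStepB m) rem = rem := by
  intro seg
  induction seg with
  | nil => intro fbs s rem _; simp [PySem.List.enumerate_nil]
  | cons kv seg' ih =>
    intro fbs s rem hall
    cases fbs with
    | nil => simp [PySem.List.enumerate_nil]
    | cons fb fbs' =>
      simp only [List.zip_cons_cons, PySem.List.enumerate_cons, List.foldl_cons]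
      have h1 : pvStepB m rem (s, kv, fb) = rem := by
        unfold pvStepB
        have := hall kv (List.mem_cons_self ..)
        simp [this]
      rw [h1]
      exact ih fbs' (s + 1) rem (fun q hq => hall q (List.mem_cons_of_mem _ hq))

lemma pvFold_skip_small (m : Int) : ∀ (seg : List (Option String × Int)) (fbs : List (Int × Int)) (s : Int) (rem : pvRem),
    (∀ p ∈ fbs, ¬ m ≤ p.1 + p.2 - 1) →
    (PySem.List.enumerate (seg.zip fbs) s).foldl (pvStepB m) rem = rem := by
  intro seg
  induction seg with
  | nil => intro fbs s rem _; simp [PySem.List.enumerate_nil]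
  | cons kv seg' ih =>
    intro fbs s rem hall
    cases fbs with
    | nil => simp [PySem.List.enumerate_nil]
    | cons fb fbs' =>
      simp only [List.zip_cons_cons, PySem.List.enumerate_cons, List.foldl_cons]
      have h1 : pvStepB m rem (s, kv, fb) = rem := by
        unfold pvStepB
        have := hall fb (List.mem_cons_self ..)
        simp only [not_le] at this
        have : ¬ (kv.1 ≠ none ∧ m ≤ fb.1 + fb.2 - 1) := by
          rintro ⟨_, h2⟩; omega
        rw [if_neg this]
      rw [h1]
      exact ih fbs' (s + 1) rem (fun q hq => hall q (List.mem_cons_of_mem _ hq))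

lemma pvFold_all_true (m : Int) : ∀ (seg : List (Option String × Int)) (fbs : List (Int × Int)) (s : Int) (rem : pvRem),
    (∀ kv ∈ seg, kv.1 ≠ (none : Option String)) →
    (∀ p ∈ fbs, m ≤ p.1 + p.2 - 1) →
    seg.length ≤ fbs.length →
    (PySem.List.enumerate (seg.zip fbs) s).foldl (pvStepB m) rem =
      (PySem.List.enumerate seg s).foldl pvStepOp rem := by
  intro seg
  induction seg with
  | nil => intro fbs s rem _ _ _; simp [PySem.List.enumerate_nil]
  | cons kv seg' ih =>
    intro fbs s rem hne hge hlen
    cases fbs with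
    | nil => simp at hlen
    | cons fb fbs' =>
      simp only [List.zip_cons_cons, PySem.List.enumerate_cons, List.foldl_cons]
      have h1 : pvStepB m rem (s, kv, fb) = pvStepOp rem (s, kv) := by
        unfold pvStepB pvStepOp
        rw [if_pos ⟨hne kv (List.mem_cons_self ..), hge fb (List.mem_cons_self ..)⟩]
      rw [h1]
      exact ih fbs' (s + 1) _ (fun q hq => hne q (List.mem_cons_of_mem _ hq))
        (fun q hq => hge q (List.mem_cons_of_mem _ hq)) (by simpa using Nat.le_of_succ_le_succ hlen)

-- the add-run fold over an index range is the structural fold over the enumerated segment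
lemma pvAddRun_seg : ∀ (seg pre suf : List (Option String × Int)) (rem : pvRem),
    pvAddRunB (pre ++ seg ++ suf) (pre.length : Int) ((pre.length : Int) + (seg.length : Int)) rem =
      (PySem.List.enumerate seg (pre.length : Int)).foldl pvStepOp rem := by
  intro seg
  induction seg with
  | nil =>
    intro pre suf rem
    unfold pvAddRunB
    simp only [List.length_nil, Nat.cast_zero, add_zero]
    rw [PySem.List.pyRange_one_eq_nil (le_refl _)]
    simp [PySem.List.enumerate_nil]
  | cons kv seg' ih =>
    intro pre suf rem
    unfold pvAddRunB
    have hlt : (pre.length : Int) < (pre.length : Int) + ((kv :: seg').length : Int) := by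
      simp only [List.length_cons]; push_cast; omega
    rw [PySem.List.pyRange_one_cons hlt]
    simp only [List.foldl_cons]
    have hget : PySem.List.pyGetD (pre ++ (kv :: seg') ++ suf) (pre.length : Int) (none, 0) = kv := by
      have h0 : (0 : Int) ≤ (pre.length : Int) := by positivity
      have hl : (pre.length : Int) < (((pre ++ (kv :: seg') ++ suf).length : Nat) : Int) := by
        simp only [List.length_append, List.length_cons]; push_cast; omega
      rw [PySem.List.pyGetD_eq_getElem _ (none, 0) h0 hl]
      have : (pre ++ (kv :: seg') ++ suf)[(pre.length : Int).toNat]'(by simp only [Int.toNat_natCast, List.length_append, List.length_cons]; omega) = kv := by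
        simp only [Int.toNat_natCast, List.append_assoc]
        rw [List.getElem_append_right (le_refl _)]
        simp
      exact this
    rw [hget]
    have hre : PySem.List.pyRange ((pre.length : Int) + 1) ((pre.length : Int) + ((kv :: seg').length : Int)) 1 =
        PySem.List.pyRange (((pre ++ [kv]).length : Nat) : Int) ((((pre ++ [kv]).length : Nat) : Int) + (seg'.length : Int)) 1 := by
      have e1 : (((pre ++ [kv]).length : Nat) : Int) = (pre.length : Int) + 1 := by simp
      have e2 : (((kv :: seg').length : Nat) : Int) = ((seg'.length : Nat) : Int) + 1 := by simp
      rw [e1, e2]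
      congr 1
      omega
    rw [hre]
    have hlist : pre ++ (kv :: seg') ++ suf = (pre ++ [kv]) ++ seg' ++ suf := by simp
    rw [hlist]
    have := ih (pre ++ [kv]) suf (pvStepOp rem ((pre.length : Int), kv))
    unfold pvAddRunB at this
    have hstep1 : (PySem.Dict.modify rem (pre.length : Int) PySem.Set.empty fun s => PySem.Set.add s kv.2) = pvStepOp rem ((pre.length : Int), kv) := rfl
    rw [hstep1, this, PySem.List.enumerate_cons]
    simp only [List.foldl_cons]
    have hs : (((pre ++ [kv]).length : Nat) : Int) = (pre.length : Int) + 1 := by simp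
    rw [hs]

-- MAIN: the grouping pass over the rle equals B's guarded fold over the zipped streak blocks
lemma pvGroups_eq_B (m : Int) : ∀ (gs : List (Option String × Nat)) (pre suf : List (Option String × Int)) (rem : pvRem),
    pvGood gs → suf.map Prod.fst = pvExpand gs →
    (pvGroupsB m (pre ++ suf) gs (rem, (pre.length : Int))).1 =
      (PySem.List.enumerate (suf.zip ((gs.flatMap pvFwdBlock).zip (gs.flatMap pvBwdBlock))) (pre.length : Int)).foldl (pvStepB m) rem := by
  intro gs
  induction gs with
  | nil =>
    intro pre suf rem _ hsf
    have : suf = [] := by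
      have := hsf
      simp [pvExpand] at this
      exact this
    subst this
    simp [pvGroupsB, PySem.List.enumerate_nil]
  | cons g gs' ih =>
    intro pre suf rem hgood hsf
    obtain ⟨v, n⟩ := g
    have hn : 1 ≤ n := hgood.1 _ (List.mem_cons_self ..)
    have hgood' : pvGood gs' :=
      ⟨fun q hq => hgood.1 q (List.mem_cons_of_mem _ hq), (List.isChain_cons.mp hgood.2).2⟩
    have hsf' : suf.map Prod.fst = List.replicate n v ++ pvExpand gs' := by
      rw [hsf]; simp [pvExpand]
    have hsuflen : n ≤ suf.length := by
      have := congrArg List.length hsf'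
      simp at this
      omega
    set seg := suf.take n with hseg
    set suf2 := suf.drop n with hsuf2
    have hsplit : suf = seg ++ suf2 := (List.take_append_drop n suf).symm
    have hseglen : seg.length = n := by simp [hseg, hsuflen]
    have hsegmap : seg.map Prod.fst = List.replicate n v := by
      rw [hseg, List.map_take, hsf']
      simp
    have hsuf2map : suf2.map Prod.fst = pvExpand gs' := by
      rw [hsuf2, List.map_drop, hsf']
      simp
    -- block lengths
    have hFlen : (pvFwdBlock (v, n)).length = n := by
      cases v <;> simp [pvFwdBlock, pvRamp]
    have hBlen : (pvBwdBlock (v, n)).length = n := by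
      cases v <;> simp [pvBwdBlock, pvRamp]
    -- decompose the zipped list
    have hflatF : ((v, n) :: gs').flatMap pvFwdBlock = pvFwdBlock (v, n) ++ gs'.flatMap pvFwdBlock := by simp
    have hflatB : ((v, n) :: gs').flatMap pvBwdBlock = pvBwdBlock (v, n) ++ gs'.flatMap pvBwdBlock := by simp
    have hzin : (((v, n) :: gs').flatMap pvFwdBlock).zip (((v, n) :: gs').flatMap pvBwdBlock) =
        ((pvFwdBlock (v, n)).zip (pvBwdBlock (v, n))) ++ ((gs'.flatMap pvFwdBlock).zip (gs'.flatMap pvBwdBlock)) := by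
      rw [hflatF, hflatB, List.zip_append (by rw [hFlen, hBlen])]
    have hinlen : ((pvFwdBlock (v, n)).zip (pvBwdBlock (v, n))).length = n := by
      simp [List.length_zip, hFlen, hBlen]
    have hzout : suf.zip ((((v, n) :: gs').flatMap pvFwdBlock).zip (((v, n) :: gs').flatMap pvBwdBlock)) =
        (seg.zip ((pvFwdBlock (v, n)).zip (pvBwdBlock (v, n)))) ++
          (suf2.zip ((gs'.flatMap pvFwdBlock).zip (gs'.flatMap pvBwdBlock))) := by
      rw [hzin]
      conv_lhs => rw [hsplit]
      rw [List.zip_append (by rw [hseglen, hinlen])]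
    have houtlen : (seg.zip ((pvFwdBlock (v, n)).zip (pvBwdBlock (v, n)))).length = n := by
      simp [List.length_zip, hseglen, hinlen]
    rw [hzout, PySem.List.enumerate_append, List.foldl_append, houtlen]
    -- the head block
    rw [pvGroups_cons]
    dsimp only
    have hkeys : pre ++ suf = (pre ++ seg) ++ suf2 := by rw [hsplit]; simp
    have hprelen : (((pre ++ seg).length : Nat) : Int) = (pre.length : Int) + (n : Int) := by
      simp [hseglen]
    cases v with
    | none =>
      have h1 : (PySem.List.enumerate (seg.zip ((pvFwdBlock ((none : Option String), n)).zip (pvBwdBlock ((none : Option String), n)))) (pre.length : Int)).foldl (pvStepB m) rem = rem := by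
        apply pvFold_skip_none
        intro kv hkv
        have : kv.1 ∈ seg.map Prod.fst := List.mem_map_of_mem hkv
        rw [hsegmap] at this
        exact List.eq_of_mem_replicate this
      rw [h1]
      have := ih (pre ++ seg) suf2 rem hgood' hsuf2map
      rw [← hkeys, hprelen] at this
      exact this
    | some t =>
      have hsegne : ∀ kv ∈ seg, kv.1 ≠ (none : Option String) := by
        intro kv hkv
        have : kv.1 ∈ seg.map Prod.fst := List.mem_map_of_mem hkv
        rw [hsegmap] at this
        rw [List.eq_of_mem_replicate this]
        simp
      have hfb : (pvFwdBlock ((some t : Option String), n)).zip (pvBwdBlock ((some t : Option String), n)) =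
          List.zip (pvRamp n) ((pvRamp n).reverse) := rfl
      by_cases hm : m ≤ (n : Int)
      · rw [if_pos hm]
        have h1 : (PySem.List.enumerate (seg.zip ((pvFwdBlock ((some t : Option String), n)).zip (pvBwdBlock ((some t : Option String), n)))) (pre.length : Int)).foldl (pvStepB m) rem =
            (PySem.List.enumerate seg (pre.length : Int)).foldl pvStepOp rem := by
          rw [hfb]
          apply pvFold_all_true m seg _ _ rem hsegne
          · intro p hp
            rw [pvZip_ramp_sum n p hp]
            exact hm
          · simp [List.length_zip, pvRamp, hseglen]
        rw [h1]
        have h2 : pvAddRunB (pre ++ suf) (pre.length : Int) ((pre.length : Int) + (n : Int)) rem =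
            (PySem.List.enumerate seg (pre.length : Int)).foldl pvStepOp rem := by
          rw [hkeys, show ((n : Nat) : Int) = ((seg.length : Nat) : Int) from by rw [hseglen]]
          exact pvAddRun_seg seg pre suf2 rem
        rw [← h2]
        have := ih (pre ++ seg) suf2 (pvAddRunB (pre ++ suf) (pre.length : Int) ((pre.length : Int) + (n : Int)) rem) hgood' hsuf2map
        rw [← hkeys, hprelen] at this
        exact this
      · rw [if_neg hm]
        have h1 : (PySem.List.enumerate (seg.zip ((pvFwdBlock ((some t : Option String), n)).zip (pvBwdBlock ((some t : Option String), n)))) (pre.length : Int)).foldl (pvStepB m) rem = rem := by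
          rw [hfb]
          apply pvFold_skip_small
          intro p hp
          rw [pvZip_ramp_sum n p hp]
          exact hm
        rw [h1]
        have := ih (pre ++ seg) suf2 rem hgood' hsuf2map
        rw [← hkeys, hprelen] at this
        exact this

-- one outer iteration of A equals one outer iteration of B
lemma pvInner_eq (pages : List String) (position : String) (min_consecutive line_offset : Int) (rem : pvRem) :
    pvInnerA pages position min_consecutive line_offset rem = pvInnerB pages position min_consecutive line_offset rem := by
  have hgood : pvGood (pvRleB ((pvKeysB pages position line_offset).map (·.1))) :=
    ⟨pvRle_pos _, pvRle_chain _⟩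
  have hexp : (pvKeysB pages position line_offset).map (·.1) =
      pvExpand (pvRleB ((pvKeysB pages position line_offset).map (·.1))) := (pvExpand_rle _).symm
  have hA : pvInnerA pages position min_consecutive line_offset rem =
      (pvGroupsB min_consecutive (pvKeysB pages position line_offset)
        (pvRleB ((pvKeysB pages position line_offset).map (·.1))) (rem, 0)).1 := by
    have h0 : (0 : Int) = (pages.length : Int) - (pages.length : Nat) := by ring
    have hmain := pvA_to_scan pages position min_consecutive line_offset pages.length 0 (rem, 0, none)
      h0 (le_refl 0) ⟨le_refl 0, le_refl 0, by simp⟩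
    unfold pvInnerA
    simp only [Int.toNat_zero, List.drop_zero] at hmain
    rw [hmain]
    exact (pvScan_eq_groups pages position min_consecutive line_offset
      ((pvKeysB pages position line_offset).map (·.1)) 0 rem).1 0
  have hgroups := pvGroups_eq_B min_consecutive (pvRleB ((pvKeysB pages position line_offset).map (·.1)))
    [] (pvKeysB pages position line_offset) rem hgood hexp
  simp only [List.nil_append, List.length_nil, Nat.cast_zero] at hgroups
  have hfwd : pvStreaks none 0 ((pvKeysB pages position line_offset).map (·.1)) =
      (pvRleB ((pvKeysB pages position line_offset).map (·.1))).flatMap pvFwdBlock := by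
    conv_lhs => rw [hexp]
    exact pvFwd_expand _ none 0 hgood (pvPrevOK_none _)
  have hbwd : (PySem.List.slice? (pvStreaks none 0
        ((PySem.List.slice? ((pvKeysB pages position line_offset).map (·.1)) none none (-1)).getD []))
        none none (-1)).getD [] =
      (pvRleB ((pvKeysB pages position line_offset).map (·.1))).flatMap pvBwdBlock := by
    rw [PySem.List.slice?_none_none_neg_one]
    simp only [Option.getD_some]
    rw [PySem.List.slice?_none_none_neg_one]
    simp only [Option.getD_some]
    conv_lhs => rw [hexp]
    exact pvBwd_expand _ hgood
  have hB : pvInnerB pages position min_consecutive line_offset rem =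
      (PySem.List.enumerate ((pvKeysB pages position line_offset).zip
        ((pvStreaks none 0 ((pvKeysB pages position line_offset).map (·.1))).zip
          ((PySem.List.slice? (pvStreaks none 0
              ((PySem.List.slice? ((pvKeysB pages position line_offset).map (·.1)) none none (-1)).getD []))
              none none (-1)).getD [])))).foldl (pvStepB min_consecutive) rem := rfl
  rw [hA, hgroups, hB, hfwd, hbwd]

-- ===== VERDICT (by name: the statement is the Claim_ definition above) =====
theorem find_repeating_lines_py_spec : Claim_equal_find_repeating_lines_py := by
  intro pages position min_consecutive check_lines _
  unfold Spec_find_repeating_lines_py find_repeating_lines_py find_repeating_lines_py_alt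
  congr 1
  exact PySem.List.foldl_congr_mem _ _ _ _ (fun acc x _ => pvInner_eq pages position min_consecutive x acc)
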